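-- pv_equiv track=rewrite | github.com/Akaisorani/code_data_of_mvgpt | utils/preprocess_csv_text.py | build_cluster_range_index
-- ===== SOURCE A (Python) =====
-- def build_cluster_range_index(dataset):
--     idtfr_rng={}
--     for i, line in enumerate(dataset):
--         idtfr=line['idtfr']
--         if line['idtfr'] not in idtfr_rng:
--             idtfr_rng[idtfr]=[i,i]
--         else:
--             idtfr_rng[idtfr][1]=i
--     return idtfr_rng
-- ===== SOURCE B (Python) =====
-- def build_cluster_range_index(dataset):
--     first = {}
--     for i, line in enumerate(dataset):
--         first.setdefault(line['idtfr'], i)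
--     last = {}
--     for i, line in enumerate(dataset):
--         last[line['idtfr']] = i
--     return {k: [first[k], last[k]] for k in first}
-- ===== Notes on version B (the rewrite author's own statement) =====
-- stated objective: alternative
-- what changed: A's single fused loop with an in-dict branch and in-place value mutation is replaced by two independent passes (first occurrence via setdefault, last occurrence via plain overwrite) merged by a comprehension over the first-occurrence dict.
import Mathlib
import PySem

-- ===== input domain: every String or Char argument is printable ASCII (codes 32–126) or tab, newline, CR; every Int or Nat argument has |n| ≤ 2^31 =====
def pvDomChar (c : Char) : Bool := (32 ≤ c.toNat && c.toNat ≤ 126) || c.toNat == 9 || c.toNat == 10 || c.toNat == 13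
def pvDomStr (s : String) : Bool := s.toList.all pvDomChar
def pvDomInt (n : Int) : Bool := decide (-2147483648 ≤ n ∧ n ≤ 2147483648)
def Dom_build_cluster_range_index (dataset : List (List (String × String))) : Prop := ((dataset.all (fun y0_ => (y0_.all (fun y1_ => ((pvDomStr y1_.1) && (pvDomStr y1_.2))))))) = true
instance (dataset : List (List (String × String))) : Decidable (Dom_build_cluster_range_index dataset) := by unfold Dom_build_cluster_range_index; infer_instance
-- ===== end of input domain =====

-- B replaces A's single fused loop (branching on key presence and mutating the value list
-- in place) by two independent passes building a first-occurrence and a last-occurrence map,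
-- merged by a comprehension over the first-occurrence map; objective: alternative decomposition.
-- A mutates nothing observable; equivalence is about the return value.

-- ===== PORT A =====
-- line['idtfr'] : first-match lookup; Pre_ guarantees the key is present, so the "" default is never used.
def pvKey (line : List (String × String)) : String :=
  (PySem.Dict.mk line).getD "idtfr" ""

def build_cluster_range_index (dataset : List (List (String × String))) : List (String × List Int) :=
  ((PySem.List.enumerate dataset).foldl
    (fun d p =>
      let idtfr := pvKey p.2
      if d.contains idtfr = false then d.insert idtfr [p.1, p.1]
      -- idtfr_rng[idtfr][1] = i : the value list always has length 2, so List.set 1 is exact here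
      else d.modify idtfr [] (fun v => v.set 1 p.1))
    PySem.Dict.empty).items

-- ===== PORT B =====
def build_cluster_range_index_alt (dataset : List (List (String × String))) : List (String × List Int) :=
  let first := (PySem.List.enumerate dataset).foldl
    (fun d p => d.setdefault (pvKey p.2) p.1) PySem.Dict.empty
  let last := (PySem.List.enumerate dataset).foldl
    (fun d p => d.insert (pvKey p.2) p.1) PySem.Dict.empty
  (first.keys.foldl
    (fun d k => d.insert k [first.getD k 0, last.getD k 0]) PySem.Dict.empty).items

-- ===== PRECONDITION & SPEC =====
-- Pre_ excludes exactly the inputs where some line lacks the key 'idtfr', on which both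
-- Python A and Python B raise KeyError.
def Pre_build_cluster_range_index (dataset : List (List (String × String))) : Prop :=
  (dataset.all (fun line => line.any (fun p => p.1 == "idtfr"))) = true
instance (dataset : List (List (String × String))) : Decidable (Pre_build_cluster_range_index dataset) := by
  unfold Pre_build_cluster_range_index; infer_instance

def pvWitness_build_cluster_range_index : (List (List (String × String))) :=
  [[("idtfr", "a")], [("idtfr", "b")], [("idtfr", "a")]]

def Spec_build_cluster_range_index (dataset : List (List (String × String))) (out : List (String × List Int)) : Prop := out = build_cluster_range_index_alt dataset
instance (dataset : List (List (String × String))) (out : List (String × List Int)) : Decidable (Spec_build_cluster_range_index dataset out) := by unfold Spec_build_cluster_range_index; infer_instance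

-- ===== CLAIM (what is proved, stated in full; the proofs are below) =====
def Claim_equal_build_cluster_range_index : Prop := ∀ (dataset : List (List (String × String))), Dom_build_cluster_range_index dataset → Pre_build_cluster_range_index dataset → Spec_build_cluster_range_index dataset (build_cluster_range_index dataset)

-- ===== LEMMAS AND PROOFS =====

-- the three folds, named for the proofs (definitionally the ones inside the ports)
def pvA (ds : List (List (String × String))) : PySem.Dict String (List Int) :=
  (PySem.List.enumerate ds).foldl
    (fun d p =>
      let idtfr := pvKey p.2
      if d.contains idtfr = false then d.insert idtfr [p.1, p.1]
      else d.modify idtfr [] (fun v => v.set 1 p.1))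
    PySem.Dict.empty

def pvF (ds : List (List (String × String))) : PySem.Dict String Int :=
  (PySem.List.enumerate ds).foldl (fun d p => d.setdefault (pvKey p.2) p.1) PySem.Dict.empty

def pvL (ds : List (List (String × String))) : PySem.Dict String Int :=
  (PySem.List.enumerate ds).foldl (fun d p => d.insert (pvKey p.2) p.1) PySem.Dict.empty

-- the combined loop invariant: key sets coincide with the first-occurrence set of the
-- key stream, and A's value at any present key is [first index, last index]
def pvInv (ds : List (List (String × String))) : Prop :=
  (pvA ds).keys = PySem.Set.ofList (ds.map pvKey) ∧
  (pvF ds).keys = PySem.Set.ofList (ds.map pvKey) ∧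
  (pvL ds).keys = PySem.Set.ofList (ds.map pvKey) ∧
  ∀ k, k ∈ ds.map pvKey →
    (pvA ds).getD k [] = [(pvF ds).getD k 0, (pvL ds).getD k 0]

theorem pvInv_holds (ds : List (List (String × String))) : pvInv ds := by
  induction ds using List.reverseRecOn with
  | nil => refine ⟨rfl, rfl, rfl, ?_⟩; intro k hk; simp at hk
  | append_singleton ds l ih =>
    obtain ⟨hAk, hFk, hLk, hV⟩ := ih
    have hstep : ∀ {β : Type} (f : PySem.Dict String β → Int × List (String × String) → PySem.Dict String β) ,
        (PySem.List.enumerate (ds ++ [l])).foldl f PySem.Dict.empty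
          = f ((PySem.List.enumerate ds).foldl f PySem.Dict.empty) ((ds.length : Int), l) := by
      intro β f
      rw [PySem.List.enumerate_append]
      simp [PySem.List.enumerate]
    have hA : pvA (ds ++ [l]) =
        (if (pvA ds).contains (pvKey l) = false
         then (pvA ds).insert (pvKey l) [(ds.length : Int), (ds.length : Int)]
         else (pvA ds).modify (pvKey l) [] (fun v => v.set 1 (ds.length : Int))) := by
      unfold pvA; rw [hstep]
    have hF : pvF (ds ++ [l]) = (pvF ds).setdefault (pvKey l) (ds.length : Int) := by
      unfold pvF; rw [hstep]
    have hL : pvL (ds ++ [l]) = (pvL ds).insert (pvKey l) (ds.length : Int) := by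
      unfold pvL; rw [hstep]
    have hmap : (ds ++ [l]).map pvKey = ds.map pvKey ++ [pvKey l] := by simp
    have hofl : PySem.Set.ofList ((ds ++ [l]).map pvKey)
        = PySem.Set.add (PySem.Set.ofList (ds.map pvKey)) (pvKey l) := by
      rw [hmap, PySem.Set.ofList_append]
      simp [PySem.Set.update]
    -- contains in each dict = membership in the key stream
    have hcont : ∀ (β : Type) (d : PySem.Dict String β),
        d.keys = PySem.Set.ofList (ds.map pvKey) →
        d.contains (pvKey l) = decide (pvKey l ∈ ds.map pvKey) := by
      intro β d hdk
      rcases Bool.eq_false_or_eq_true (d.contains (pvKey l)) with h | h <;>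
        rw [h] <;> symm
      · simp only [decide_eq_true_eq]
        have : pvKey l ∈ d.keys := (PySem.Dict.contains_iff_mem_keys _ _).1 h
        rw [hdk] at this
        exact (PySem.Set.mem_ofList _ _).1 this
      · simp only [decide_eq_false_iff_not]
        intro hm
        have : pvKey l ∈ d.keys := by
          rw [hdk]; exact (PySem.Set.mem_ofList _ _).2 hm
        rw [← PySem.Dict.contains_iff_mem_keys] at this
        simp [h] at this
    by_cases hmem : pvKey l ∈ ds.map pvKey
    · -- existing key: A modifies, F is unchanged, L overwrites
      have hcA : (pvA ds).contains (pvKey l) = true := by rw [hcont _ _ hAk]; simp [hmem]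
      have hcF : (pvF ds).contains (pvKey l) = true := by rw [hcont _ _ hFk]; simp [hmem]
      have hcL : (pvL ds).contains (pvKey l) = true := by rw [hcont _ _ hLk]; simp [hmem]
      have hA' : pvA (ds ++ [l]) = (pvA ds).modify (pvKey l) [] (fun v => v.set 1 (ds.length : Int)) := by
        rw [hA, hcA]; simp
      have hF' : pvF (ds ++ [l]) = pvF ds := by
        rw [hF, PySem.Dict.setdefault_of_contains _ _ hcF]
      have hadd : PySem.Set.add (PySem.Set.ofList (ds.map pvKey)) (pvKey l)
          = PySem.Set.ofList (ds.map pvKey) := by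
        obtain ⟨a, ha, hka⟩ := List.mem_map.1 hmem
        simp [PySem.Set.add, PySem.Set.contains]
        exact ⟨a, ha, hka⟩
      refine ⟨?_, ?_, ?_, ?_⟩
      · rw [hA', PySem.Dict.keys_modify, PySem.Dict.keys_insert_of_contains _ _ hcA, hofl, hadd, hAk]
      · rw [hF', hofl, hadd]; exact hFk
      · rw [hL, PySem.Dict.keys_insert_of_contains _ _ hcL, hofl, hadd]; exact hLk
      · intro k hk
        rw [hA', hF', hL]
        by_cases hkl : k = pvKey l
        · subst hkl
          rw [PySem.Dict.getD_modify_self, PySem.Dict.getD_insert_self, hV _ hmem]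
          rfl
        · rw [PySem.Dict.getD_modify_of_ne _ _ _ hkl,
              PySem.Dict.getD_insert_of_ne _ _ _ hkl]
          rw [hmap] at hk
          rcases List.mem_append.1 hk with h | h
          · exact hV _ h
          · simp at h; exact absurd h hkl
    · -- new key: A and F insert it; L inserts it too
      have hcA : (pvA ds).contains (pvKey l) = false := by rw [hcont _ _ hAk]; simp [hmem]
      have hcF : (pvF ds).contains (pvKey l) = false := by rw [hcont _ _ hFk]; simp [hmem]
      have hcL : (pvL ds).contains (pvKey l) = false := by rw [hcont _ _ hLk]; simp [hmem]
      have hA' : pvA (ds ++ [l]) = (pvA ds).insert (pvKey l) [(ds.length : Int), (ds.length : Int)] := by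
        rw [hA, hcA]; simp
      have hF' : pvF (ds ++ [l]) = (pvF ds).insert (pvKey l) (ds.length : Int) := by
        rw [hF, PySem.Dict.setdefault_of_not_contains _ _ hcF]
      have hadd : PySem.Set.add (PySem.Set.ofList (ds.map pvKey)) (pvKey l)
          = PySem.Set.ofList (ds.map pvKey) ++ [pvKey l] := by
        simp [PySem.Set.add, PySem.Set.contains]
        intro a ha hka
        exact hmem (List.mem_map.2 ⟨a, ha, hka⟩)
      refine ⟨?_, ?_, ?_, ?_⟩
      · rw [hA', PySem.Dict.keys_insert_of_not_contains _ _ hcA, hofl, hadd, hAk]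
      · rw [hF', PySem.Dict.keys_insert_of_not_contains _ _ hcF, hofl, hadd, hFk]
      · rw [hL, PySem.Dict.keys_insert_of_not_contains _ _ hcL, hofl, hadd, hLk]
      · intro k hk
        rw [hA', hF', hL]
        by_cases hkl : k = pvKey l
        · subst hkl
          rw [PySem.Dict.getD_insert_self, PySem.Dict.getD_insert_self, PySem.Dict.getD_insert_self]
        · rw [PySem.Dict.getD_insert_of_ne _ _ _ hkl,
              PySem.Dict.getD_insert_of_ne _ _ _ hkl,
              PySem.Dict.getD_insert_of_ne _ _ _ hkl]
          rw [hmap] at hk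
          rcases List.mem_append.1 hk with h | h
          · exact hV _ h
          · simp at h; exact absurd h hkl

-- ===== VERDICT (by name: the statement is the Claim_ definition above) =====
theorem build_cluster_range_index_spec : Claim_equal_build_cluster_range_index := by
  intro ds _ _
  show build_cluster_range_index ds = build_cluster_range_index_alt ds
  obtain ⟨hAk, hFk, hLk, hV⟩ := pvInv_holds ds
  have hAch : build_cluster_range_index ds = (pvA ds).items := rfl
  have hBch : build_cluster_range_index_alt ds
      = ((pvF ds).keys.foldl
          (fun d k => d.insert k [(pvF ds).getD k 0, (pvL ds).getD k 0]) PySem.Dict.empty).items := rfl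
  have hnodA : (pvA ds).keys.Nodup := by rw [hAk]; exact PySem.Set.nodup_ofList _
  have hnodF : (pvF ds).keys.Nodup := by rw [hFk]; exact PySem.Set.nodup_ofList _
  have hfresh := PySem.Dict.items_foldl_insert_fresh (pvF ds).keys (fun k => k)
      (fun k => [(pvF ds).getD k 0, (pvL ds).getD k 0]) PySem.Dict.empty
      (fun a _ => PySem.Dict.contains_empty a) (by simpa using hnodF)
  have hemp : (PySem.Dict.empty : PySem.Dict String (List Int)).items = [] := rfl
  rw [hAch, hBch,
    PySem.Dict.items_eq_map_keys (pvA ds) hnodA [], hfresh]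
  rw [hAk, hFk, hemp]
  simp only [List.nil_append]
  apply List.map_congr_left
  intro k hk
  rw [hV k ((PySem.Set.mem_ofList _ _).1 hk)]
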